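-- pv_equiv track=rewrite | github.com/soundcloud/project-dev-kpis | lib/jira_util.py | get_or_else
-- ===== SOURCE A (Python) =====
-- def get_or_else(log, get_by_priority):
--     if len(get_by_priority) > 0:
--         in_progress = next(
--                 (t[1] for t in log if t[0] == get_by_priority[0]),
--                 None
--         )
--         if in_progress is None:
--             return get_or_else(log, get_by_priority[1:])
--         else:
--             return in_progress
--     else:
--         return None
-- ===== SOURCE B (Python) =====
-- def get_or_else(log, get_by_priority):
--     first = {}
--     for k, v in log:
--         if k not in first:
--             first[k] = v
--     for key in get_by_priority:
--         if key in first: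
--             return first[key]
--     return None
-- ===== Notes on version B (the rewrite author's own statement) =====
-- stated objective: faster
-- what changed: Replaces the tail recursion over priorities with re-scans of the log by a single pass that builds a first-occurrence dict once, then an iterative loop over priorities doing O(1) lookups.
import Mathlib
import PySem

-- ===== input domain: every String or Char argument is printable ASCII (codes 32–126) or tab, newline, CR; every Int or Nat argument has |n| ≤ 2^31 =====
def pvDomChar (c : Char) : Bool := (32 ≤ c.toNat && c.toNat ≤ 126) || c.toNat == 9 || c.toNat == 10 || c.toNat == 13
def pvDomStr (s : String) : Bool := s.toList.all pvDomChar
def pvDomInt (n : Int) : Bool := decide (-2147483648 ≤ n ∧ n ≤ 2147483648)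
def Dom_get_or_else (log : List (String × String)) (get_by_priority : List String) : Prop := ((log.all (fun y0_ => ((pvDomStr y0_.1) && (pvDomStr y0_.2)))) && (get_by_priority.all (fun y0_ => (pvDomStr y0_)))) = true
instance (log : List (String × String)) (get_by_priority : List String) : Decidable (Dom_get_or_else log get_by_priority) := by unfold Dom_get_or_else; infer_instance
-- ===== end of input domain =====

-- B replaces A's tail recursion (which re-scans the whole log for each priority) by one
-- pass building a first-occurrence dict, then an iterative lookup loop (objective: alternative).

-- ===== PORT A =====
def get_or_else (log : List (String × String)) (get_by_priority : List String) : Option String :=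
  match get_by_priority with
  | [] => none
  | k :: rest =>
    -- next((t[1] for t in log if t[0] == get_by_priority[0]), None)
    match (log.find? (fun t => t.1 == k)).map (·.2) with
    | none => get_or_else log rest
    | some v => some v

-- ===== PORT B =====
-- first = {}; for k, v in log: if k not in first: first[k] = v
def goeFirst (log : List (String × String)) : PySem.Dict String String :=
  log.foldl (fun d p => if d.contains p.1 then d else d.insert p.1 p.2) PySem.Dict.empty

-- for key in get_by_priority: if key in first: return first[key]; return None
def goeLoop (first : PySem.Dict String String) (gp : List String) : Option String :=
  match gp with
  | [] => none
  | k :: rest => if first.contains k then first.get? k else goeLoop first rest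

def get_or_else_alt (log : List (String × String)) (get_by_priority : List String) : Option String :=
  goeLoop (goeFirst log) get_by_priority

-- ===== PRECONDITION & SPEC =====
def Spec_get_or_else (log : List (String × String)) (get_by_priority : List String) (out : Option String) : Prop := out = get_or_else_alt log get_by_priority
instance (log : List (String × String)) (get_by_priority : List String) (out : Option String) : Decidable (Spec_get_or_else log get_by_priority out) := by unfold Spec_get_or_else; infer_instance

-- ===== CLAIM (what is proved, stated in full; the proofs are below) =====
def Claim_equal_get_or_else : Prop := ∀ (log : List (String × String)) (get_by_priority : List String), Dom_get_or_else log get_by_priority → Spec_get_or_else log get_by_priority (get_or_else log get_by_priority)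

-- ===== LEMMAS AND PROOFS =====

-- the insert-if-absent fold keeps the FIRST value for each key: its get? is first-match on log
theorem goeFirst_get?_gen (log : List (String × String)) (d : PySem.Dict String String) (k : String) :
    (log.foldl (fun d p => if d.contains p.1 then d else d.insert p.1 p.2) d).get? k
      = ((d.get? k).or ((log.find? (fun t => t.1 == k)).map (·.2))) := by
  induction log generalizing d with
  | nil => simp
  | cons p rest ih =>
    simp only [List.foldl_cons, List.find?_cons]
    by_cases hc : d.contains p.1 = true
    · rw [if_pos hc]
      by_cases hk : p.1 = k
      · subst hk
        rw [ih]
        have : (d.get? p.1).isSome := by rw [← PySem.Dict.contains_eq_isSome_get?]; exact hc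
        cases h : d.get? p.1 with
        | none => simp [h] at this
        | some v => simp
      · have : (p.1 == k) = false := by simp [hk]
        simp [this]
        rw [ih]
    · rw [if_neg hc]
      rw [ih]
      by_cases hk : p.1 = k
      · subst hk
        have hd : d.get? p.1 = none := by
          cases h : d.get? p.1 with
          | none => rfl
          | some v =>
            exfalso; apply hc
            rw [PySem.Dict.contains_eq_isSome_get?, h]; rfl
        simp [PySem.Dict.get?_insert, hd]
      · have hbk : (p.1 == k) = false := by simp [hk]
        rw [PySem.Dict.get?_insert]
        simp [Ne.symm hk, hbk]

theorem goeFirst_get? (log : List (String × String)) (k : String) :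
    (goeFirst log).get? k = (log.find? (fun t => t.1 == k)).map (·.2) := by
  unfold goeFirst
  rw [goeFirst_get?_gen]
  simp

theorem goe_eq (log : List (String × String)) (gp : List String) :
    get_or_else log gp = get_or_else_alt log gp := by
  unfold get_or_else_alt
  induction gp with
  | nil => simp [get_or_else, goeLoop]
  | cons k rest ih =>
    simp only [get_or_else, goeLoop]
    rw [← goeFirst_get? log k]
    cases h : (goeFirst log).get? k with
    | none =>
      have hc : (goeFirst log).contains k = false := by
        rw [PySem.Dict.contains_eq_isSome_get?, h]; rfl
      simp [hc, ih]
    | some v =>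
      have hc : (goeFirst log).contains k = true := by
        rw [PySem.Dict.contains_eq_isSome_get?, h]; rfl
      simp [hc]

-- ===== VERDICT (by name: the statement is the Claim_ definition above) =====
theorem get_or_else_spec : Claim_equal_get_or_else := by
  intro log gp _
  unfold Spec_get_or_else
  exact goe_eq log gp
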